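-- pv_equiv track=rewrite | github.com/npstash/public_rka | rka/eq2/master/game/census/census_service_bridge.py | __get_ability_base_name
-- ===== SOURCE A (Python) =====
-- def __get_ability_base_name(name: str) -> str:
--     suffix = name.split(' ')[-1]
--     suffix_is_roman_number = False
--     roman_number_chars = 'IVX'
--     for letter in suffix:
--         if letter not in roman_number_chars:
--             suffix_is_roman_number = False
--             break
--         suffix_is_roman_number = True
--     if suffix_is_roman_number:
--         return name[:-len(suffix) - 1]
--     return name
-- ===== SOURCE B (Python) =====
-- def __get_ability_base_name(name: str) -> str:
--     # Single backward scan: find the start i of the maximal trailing run of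
--     # roman-numeral characters, then decide from what precedes it.
--     i = len(name)
--     while i > 0 and name[i - 1] in 'IVX':
--         i -= 1
--     if i == len(name):        # no trailing roman run -> empty suffix, keep name
--         return name
--     if i == 0:                # whole string is roman -> stripped to ''
--         return ''
--     if name[i - 1] == ' ':    # run is a whole space-separated word -> drop it + separator
--         return name[:i - 1]
--     return name               # run is glued to a non-roman char -> last word not roman
-- ===== Notes on version B (the rewrite author's own statement) =====
-- stated objective: alternative
-- what changed: Replaced split-on-space + per-character membership loop + negative slice by a single backward scan that finds the start of the maximal trailing IVX-run and inspects the one character before it.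
import Mathlib
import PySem

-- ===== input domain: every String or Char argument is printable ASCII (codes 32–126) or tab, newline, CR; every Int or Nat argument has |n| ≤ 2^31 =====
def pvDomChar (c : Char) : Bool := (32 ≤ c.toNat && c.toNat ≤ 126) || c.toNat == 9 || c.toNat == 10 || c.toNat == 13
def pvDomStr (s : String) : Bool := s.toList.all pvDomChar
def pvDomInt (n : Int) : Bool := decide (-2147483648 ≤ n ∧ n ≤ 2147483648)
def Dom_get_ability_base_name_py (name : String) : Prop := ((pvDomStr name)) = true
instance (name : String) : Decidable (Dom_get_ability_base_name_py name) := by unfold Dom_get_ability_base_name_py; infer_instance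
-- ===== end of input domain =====

-- B strips the trailing roman-numeral run with one backward scan instead of A's split-on-space + forward token loop + negative slice.

-- ===== PORT A =====
-- roman_number_chars = 'IVX'
def pvRomanA : List Char := ['I', 'V', 'X']

-- the `for letter in suffix` loop with its break, carrying the suffix_is_roman_number flag
def pvSuffixRoman : List Char → Bool → Bool
  | [], flag => flag
  | letter :: rest, _flag =>
      if (pvRomanA.contains letter) = false then false   -- `if letter not in roman_number_chars: … break`
      else pvSuffixRoman rest true                       -- `suffix_is_roman_number = True`

def get_ability_base_name_py (name : String) : String :=
  let suffix := PySem.List.pyGetD (PySem.Chars.splitOn name.toList [' ']) (-1) []  -- name.split(' ')[-1] (split is never empty)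
  if pvSuffixRoman suffix false then
    PySem.Str.slice name none (some (-(suffix.length : Int) - 1))                  -- name[:-len(suffix) - 1]
  else name

-- ===== PORT B =====
def pvRomanB : List Char := ['I', 'V', 'X']

-- `while i > 0 and name[i - 1] in 'IVX': i -= 1`, as structural recursion on i
def pvScan (cs : List Char) : Nat → Nat
  | 0 => 0
  | j + 1 => if pvRomanB.contains (cs.getD j ' ') then pvScan cs j else j + 1

def get_ability_base_name_py_alt (name : String) : String :=
  let cs := name.toList
  let i := pvScan cs cs.length
  if i = cs.length then name
  else if i = 0 then ""
  else if cs.getD (i - 1) ' ' = ' ' then String.ofList (cs.take (i - 1))           -- name[:i - 1]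
  else name

-- ===== PRECONDITION & SPEC =====
def Spec_get_ability_base_name_py (name : String) (out : String) : Prop := out = get_ability_base_name_py_alt name
instance (name : String) (out : String) : Decidable (Spec_get_ability_base_name_py name out) := by unfold Spec_get_ability_base_name_py; infer_instance

-- ===== CLAIM (what is proved, stated in full; the proofs are below) =====
def Claim_equal_get_ability_base_name_py : Prop := ∀ (name : String), Dom_get_ability_base_name_py name → Spec_get_ability_base_name_py name (get_ability_base_name_py name)

-- ===== LEMMAS AND PROOFS =====

def pvLastAux : List Char → List Char → List Char
  | [], cur => cur.reverse
  | c :: rest, cur => if c = ' ' then pvLastAux rest [] else pvLastAux rest (c :: cur)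

theorem pv_go_struct : ∀ (fuel : Nat) (l cur : List Char) (acc : List (List Char)),
    l.length < fuel →
    ∃ ts, PySem.Chars.splitOn.go [' '] fuel l cur acc = acc.reverse ++ ts ++ [pvLastAux l cur] := by
  intro fuel
  induction fuel with
  | zero => intro l cur acc h; omega
  | succ f ih =>
    intro l cur acc h
    cases l with
    | nil =>
      exact ⟨[], by simp [PySem.Chars.splitOn.go, pvLastAux]⟩
    | cons c rest =>
      by_cases hc : c = ' '
      · subst hc
        obtain ⟨ts, hts⟩ := ih rest [] (List.reverse cur :: acc) (by simpa using Nat.lt_of_succ_lt_succ h)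
        refine ⟨cur.reverse :: ts, ?_⟩
        simp [PySem.Chars.splitOn.go, List.isPrefixOf, hts, pvLastAux]
      · obtain ⟨ts, hts⟩ := ih rest (c :: cur) acc (by simpa using Nat.lt_of_succ_lt_succ h)
        refine ⟨ts, ?_⟩
        simp [PySem.Chars.splitOn.go, List.isPrefixOf, hc, Ne.symm hc, hts, pvLastAux]

def pvNS (c : Char) : Bool := !(c == ' ')

theorem pv_last_token (cs : List Char) :
    PySem.List.pyGetD (PySem.Chars.splitOn cs [' ']) (-1) [] = pvLastAux cs [] := by
  obtain ⟨ts, hts⟩ := pv_go_struct (cs.length + 1) cs [] [] (by omega)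
  unfold PySem.Chars.splitOn
  rw [hts]
  simpa using PySem.List.pyGetD_neg_one_append_singleton (ts) (pvLastAux cs []) []

theorem pv_tw_all (cur : List Char) (hcur : ∀ c ∈ cur, c ≠ ' ') :
    List.takeWhile pvNS cur = cur :=
  List.takeWhile_eq_self_iff.mpr (fun c hc => by simpa [pvNS] using hcur c hc)

theorem pv_lastAux_eq : ∀ (l cur : List Char), (∀ c ∈ cur, c ≠ ' ') →
    pvLastAux l cur = ((l.reverse ++ cur).takeWhile pvNS).reverse := by
  intro l
  induction l with
  | nil =>
    intro cur hcur
    simp [pvLastAux, pv_tw_all cur hcur]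
  | cons c rest ih =>
    intro cur hcur
    by_cases hc : c = ' '
    · subst hc
      rw [pvLastAux, if_pos rfl, ih [] (by simp)]
      have h1 : List.takeWhile pvNS (rest.reverse ++ ' ' :: cur) = List.takeWhile pvNS rest.reverse := by
        rw [List.takeWhile_append]
        split_ifs with h
        · have h2 : List.takeWhile pvNS (' ' :: cur) = [] := by simp [pvNS]
          have h3 : List.takeWhile pvNS rest.reverse = rest.reverse :=
            (List.takeWhile_sublist (p := pvNS) (l := rest.reverse)).eq_of_length h
          rw [h2, List.append_nil, h3]
        · rfl
      simp [h1]
    · have hcur' : ∀ x ∈ c :: cur, x ≠ ' ' := by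
        intro x hx
        rcases List.mem_cons.mp hx with hx | hx
        · rw [hx]; exact hc
        · exact hcur x hx
      rw [pvLastAux, if_neg hc, ih (c :: cur) hcur']
      simp

theorem pv_suffixRoman_eq : ∀ (l : List Char) (b : Bool),
    pvSuffixRoman l b = (if l.isEmpty then b else l.all pvRomanA.contains) := by
  intro l
  induction l with
  | nil => intro b; simp [pvSuffixRoman]
  | cons c rest ih =>
    intro b
    by_cases hc : pvRomanA.contains c
    · have hm : c ∈ pvRomanA := by simpa using hc
      rw [pvSuffixRoman, if_neg (by simp [hm]), ih true]
      cases rest <;> simp [hm]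
    · have hm : c ∉ pvRomanA := by simpa using hc
      rw [pvSuffixRoman, if_pos (by simpa using hc)]
      simp [hm]

theorem pv_scan_append : ∀ (j : Nat) (ds ts : List Char), j ≤ ds.length →
    pvScan (ds ++ ts) j = pvScan ds j := by
  intro j
  induction j with
  | zero => intro ds ts _; rfl
  | succ i ih =>
    intro ds ts h
    rw [pvScan, pvScan, List.getD_append ds ts ' ' i (by omega), ih ds ts (by omega)]

theorem pv_scan_eq (cs : List Char) :
    pvScan cs cs.length = cs.length - (cs.reverse.takeWhile pvRomanB.contains).length := by
  induction cs using List.reverseRecOn with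
  | nil => rfl
  | append_singleton ds c ih =>
    have hle : (List.takeWhile pvRomanB.contains ds.reverse).length ≤ ds.length := by
      simpa using (List.takeWhile_sublist (p := pvRomanB.contains) (l := ds.reverse)).length_le
    rw [List.length_append, List.length_singleton, pvScan]
    by_cases hc : pvRomanB.contains c
    · rw [if_pos (by simpa using hc), pv_scan_append ds.length ds [c] le_rfl, ih]
      rw [List.reverse_append, List.reverse_singleton, List.singleton_append,
        List.takeWhile_cons_of_pos hc, List.length_cons]
      omega
    · rw [if_neg (by simpa using hc)]
      rw [List.reverse_append, List.reverse_singleton, List.singleton_append,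
        List.takeWhile_cons_of_neg (by simpa using hc), List.length_nil]
      omega

theorem pv_main (name : String) :
    get_ability_base_name_py name = get_ability_base_name_py_alt name := by
  unfold get_ability_base_name_py get_ability_base_name_py_alt
  simp only [pv_last_token, pv_scan_eq, pv_suffixRoman_eq]
  rw [pv_lastAux_eq name.toList [] (by simp)]
  simp only [List.append_nil]
  set r := name.toList.reverse with hr
  set u := r.takeWhile pvRomanB.contains with hu
  set v := r.dropWhile pvRomanB.contains with hv
  have huv : u ++ v = r := List.takeWhile_append_dropWhile
  have huR : ∀ c ∈ u, pvRomanB.contains c = true := by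
    intro c hc; exact List.mem_takeWhile_imp hc
  have huNS : ∀ c ∈ u, pvNS c = true := by
    intro c hc
    have h1 := huR c hc
    have h2 : c = 'I' ∨ c = 'V' ∨ c = 'X' := by simpa [pvRomanB] using h1
    rcases h2 with rfl | rfl | rfl <;> decide
  have htuv : r.takeWhile pvNS = u ++ v.takeWhile pvNS := by
    conv_lhs => rw [← huv]
    rw [List.takeWhile_append, if_pos (by rw [List.takeWhile_eq_self_iff.mpr huNS])]
  have hlen : name.toList.length = u.length + v.length := by
    rw [← List.length_reverse (as := name.toList), ← hr, ← huv, List.length_append]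
  rw [htuv]
  have hR' : pvRomanA = pvRomanB := rfl
  rcases hu0 : u with _ | ⟨cu, u'⟩
  · -- no trailing roman run: B keeps name; A's last token cannot be nonempty and all-roman
    rw [hu0] at huv
    simp only [hu0, List.nil_append, List.length_nil, Nat.sub_zero, if_pos rfl]
    rcases ht0 : v.takeWhile pvNS with _ | ⟨c, t'⟩
    · simp
    · have hvne : v ≠ [] := by intro h; rw [h] at ht0; simp at ht0
      have hcv : v.head hvne = c := by
        rcases v with _ | ⟨c0, v0⟩
        · exact absurd rfl hvne
        · rw [List.takeWhile] at ht0
          rcases hns : pvNS c0 with _ | _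
          · rw [hns] at ht0; simp at ht0
          · rw [hns] at ht0; simp at ht0; simp [ht0.1]
      have hRc : pvRomanB.contains c = false := by
        subst hcv; exact List.head_dropWhile_not _ _
      have hcond : (if (c :: t').reverse.isEmpty = true then false
          else (c :: t').reverse.all pvRomanA.contains) = false := by
        rw [if_neg (by simp), hR', List.all_reverse, List.all_cons, hRc, Bool.false_and]
      rw [hcond, if_neg (by simp)]
      simp
  · -- nonempty trailing roman run
    have hune : u ≠ [] := by rw [hu0]; simp
    have hulen : 0 < u.length := by rw [hu0]; simp
    rw [← hu0]
    have hall : u.all pvRomanB.contains = true := List.all_eq_true.mpr huR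
    have hallrev : (if u.reverse.isEmpty = true then false
        else u.reverse.all pvRomanA.contains) = true := by
      rw [if_neg (by simp [hune]), hR', List.all_reverse]; exact hall
    rcases hv0 : v with _ | ⟨w, v'⟩
    · -- whole string is one roman word: A slices to "", B hits i = 0
      rw [hv0] at huv hlen
      simp only [List.append_nil] at huv
      simp only [List.length_nil, Nat.add_zero] at hlen
      simp only [hv0, List.takeWhile_nil, List.append_nil]
      have hi0 : name.toList.length - u.length = 0 := by omega
      rw [hallrev, if_pos rfl, hi0, if_neg (by omega), if_pos rfl]
      apply String.toList_injective
      rw [PySem.Str.toList_slice]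
      have hk : (-(u.reverse.length : Int) - 1) = -((u.length + 1 : Nat) : Int) := by
        rw [List.length_reverse]; push_cast; ring
      rw [hk, PySem.Chars.slice_eq_listSlice, PySem.List.slice_to_neg_natCast _ (u.length + 1) (by omega)]
      have h0 : name.toList.length - (u.length + 1) = 0 := by omega
      rw [h0]
      simp
    · -- run is preceded by some character w
      have hw : pvRomanB.contains w = false := by
        have hdw : List.dropWhile pvRomanB.contains r = w :: v' := by rw [← hv, hv0]
        have hvne : (List.dropWhile pvRomanB.contains r) ≠ [] := by rw [hdw]; simp
        have hh := List.head_dropWhile_not pvRomanB.contains (l := r) hvne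
        have hhead : ∀ h, (List.dropWhile pvRomanB.contains r).head h = w := by
          rw [hdw]; intro h; rfl
        rwa [hhead hvne] at hh
      rw [hv0] at huv hlen
      try simp only [hv0]
      simp only [List.length_cons] at hlen
      have hcs : name.toList = v'.reverse ++ ([w] ++ u.reverse) := by
        have hnl : name.toList = r.reverse := by rw [hr]; simp
        rw [hnl, ← huv]
        simp
      have hi : name.toList.length - u.length = v'.length + 1 := by omega
      have hgetD : name.toList.getD (v'.length + 1 - 1) ' ' = w := by
        rw [hcs, List.getD_append_right _ _ _ _ (by simp)]
        simp
      rcases hwsp : (w == ' ') with _ | _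
      · -- w is not a space: the last token contains w, so it is not roman; both keep name
        have hwne : ¬ (w = ' ') := by simpa using hwsp
        rw [List.takeWhile_cons_of_pos (by simp [pvNS, hwsp])]
        rw [if_neg (show ¬ ((if ((u ++ w :: List.takeWhile pvNS v').reverse.isEmpty) = true then false
            else (u ++ w :: List.takeWhile pvNS v').reverse.all pvRomanA.contains) = true) by
          rw [if_neg (by simp), hR', List.all_reverse]
          simp only [List.all_append, List.all_cons, hw]
          simp)]
        rw [hi, if_neg (by omega), if_neg (by omega), hgetD, if_neg hwne]
      · -- w is a space: A drops the token and the separator, B takes everything before the space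
        have hwe : w = ' ' := by simpa using hwsp
        rw [List.takeWhile_cons_of_neg (by simp [pvNS, hwsp]), List.append_nil]
        rw [hallrev, if_pos rfl]
        rw [hi, if_neg (by omega), if_neg (by omega), hgetD, if_pos hwe]
        apply String.toList_injective
        rw [PySem.Str.toList_slice]
        have hk : (-(u.reverse.length : Int) - 1) = -((u.length + 1 : Nat) : Int) := by
          rw [List.length_reverse]; push_cast; ring
        rw [hk, PySem.Chars.slice_eq_listSlice, PySem.List.slice_to_neg_natCast _ (u.length + 1) (by omega)]
        have h2 : name.toList.length - (u.length + 1) = v'.length := by omega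
        rw [h2]
        conv_rhs => rw [String.toList_ofList]
        rw [hcs, List.take_left' (by simp), List.take_left' (by simp)]

-- ===== VERDICT (by name: the statement is the Claim_ definition above) =====
theorem get_ability_base_name_py_spec : Claim_equal_get_ability_base_name_py := by
  intro name _
  unfold Spec_get_ability_base_name_py
  exact pv_main name
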